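-- pv_equiv track=rewrite | github.com/0livier1O1/tff | scripts/utils.py | _distribute_bits
-- ===== SOURCE A (Python) =====
-- def _distribute_bits(total_bits, n_cores):
--     """Factors total_bits into n_cores as evenly as possible."""
--     bits_per_core = total_bits // n_cores
--     extra = total_bits % n_cores
--     factors = []
--     for i in range(n_cores):
--         b = bits_per_core + (1 if i < extra else 0)
--         factors.append(2**b)
--     return factors
-- ===== SOURCE B (Python) =====
-- def _distribute_bits(total_bits, n_cores):
--     """Factors total_bits into n_cores as evenly as possible (greedy: each core
--     takes the ceiling of remaining_bits / cores_left, then is removed)."""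
--     factors = []
--     remaining = total_bits
--     cores_left = n_cores
--     while cores_left > 0:
--         share = -(-remaining // cores_left)
--         factors.append(2 ** share)
--         remaining -= share
--         cores_left -= 1
--     return factors
-- ===== Notes on version B (the rewrite author's own statement) =====
-- stated objective: alternative
-- what changed: Replaces A's precomputed quotient/remainder and per-index comparison loop with a greedy loop that repeatedly gives the current core the ceiling of remaining_bits/cores_left and advances on the remaining bits; no remainder comparison or index appears.
-- outside the precondition, e.g. on _distribute_bits(-1, 2): A returns [1, 0.5], B returns [1, 0.5]
import Mathlib
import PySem

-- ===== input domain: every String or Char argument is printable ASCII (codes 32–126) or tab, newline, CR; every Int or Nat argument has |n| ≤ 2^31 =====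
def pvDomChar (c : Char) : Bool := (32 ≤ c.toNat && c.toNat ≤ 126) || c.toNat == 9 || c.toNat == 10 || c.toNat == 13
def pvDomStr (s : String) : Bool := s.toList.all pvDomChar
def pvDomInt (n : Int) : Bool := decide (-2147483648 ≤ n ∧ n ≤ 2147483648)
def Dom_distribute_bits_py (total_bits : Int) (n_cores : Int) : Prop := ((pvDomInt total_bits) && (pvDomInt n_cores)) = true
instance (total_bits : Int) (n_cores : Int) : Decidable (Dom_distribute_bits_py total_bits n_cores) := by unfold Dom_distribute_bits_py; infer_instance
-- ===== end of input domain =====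

-- B replaces A's up-front quotient/remainder and per-index loop by a greedy recursion:
-- the current core takes ceil(remaining/cores_left) bits, recurse on the rest (objective: alternative).

-- ===== PORT A =====
-- literal port of A's loop: for i in range(n_cores): factors.append(2**(bpc + (1 if i < extra else 0)))
-- 2**b ported as 2 ^ b.toNat: exact on Pre_, where the evaluated exponents are nonnegative
def distribute_bits_py (total_bits : Int) (n_cores : Int) : List Int :=
  let bits_per_core := PySem.Int.floordiv total_bits n_cores
  let extra := PySem.Int.mod total_bits n_cores
  (PySem.List.pyRange 0 n_cores 1).foldl
    (fun factors i =>
      let b := bits_per_core + (if i < extra then 1 else 0)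
      factors ++ [(2 : Int) ^ b.toNat]) []

-- ===== PORT B =====
-- Source B's greedy while-loop: while cores_left > 0: share = -(-remaining // cores_left);
-- factors.append(2**share); remaining -= share; cores_left -= 1.
-- 2**share ported as 2 ^ share.toNat: exact on Pre_, where each share is nonnegative
def distribute_bits_py_altGo (remaining : Int) (cores_left : Int) (factors : List Int) : List Int :=
  if 0 < cores_left then
    let share := -(PySem.Int.floordiv (-remaining) cores_left)
    distribute_bits_py_altGo (remaining - share) (cores_left - 1) (factors ++ [(2 : Int) ^ share.toNat])
  else factors
termination_by cores_left.toNat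
decreasing_by omega

def distribute_bits_py_alt (total_bits : Int) (n_cores : Int) : List Int :=
  distribute_bits_py_altGo total_bits n_cores []

-- ===== PRECONDITION & SPEC =====
-- Pre_ excludes n_cores = 0 (A raises ZeroDivisionError) and the inputs with n_cores > 0 and
-- total_bits < 0, where a negative exponent makes 2**b a float, so A's value leaves the
-- declared integer-list type.
def Pre_distribute_bits_py (total_bits : Int) (n_cores : Int) : Prop :=
  n_cores ≠ 0 ∧ (0 < n_cores → 0 ≤ total_bits)
instance (total_bits : Int) (n_cores : Int) : Decidable (Pre_distribute_bits_py total_bits n_cores) := by unfold Pre_distribute_bits_py; infer_instance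
def pvWitness_distribute_bits_py : Int × Int := (7, 3)

def Spec_distribute_bits_py (total_bits : Int) (n_cores : Int) (out : List Int) : Prop := out = distribute_bits_py_alt total_bits n_cores
instance (total_bits : Int) (n_cores : Int) (out : List Int) : Decidable (Spec_distribute_bits_py total_bits n_cores out) := by unfold Spec_distribute_bits_py; infer_instance

-- ===== CLAIM (what is proved, stated in full; the proofs are below) =====
def Claim_equal_distribute_bits_py : Prop := ∀ (total_bits : Int) (n_cores : Int), Dom_distribute_bits_py total_bits n_cores → Pre_distribute_bits_py total_bits n_cores → Spec_distribute_bits_py total_bits n_cores (distribute_bits_py total_bits n_cores)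
-- ===== LEMMAS AND PROOFS =====

-- mapping a function that is constant on [a, b) over range(a, b) gives a replicated block
theorem pv_map_const_replicate (f : Int → Int) (a b c : Int)
    (h : ∀ i, a ≤ i → i < b → f i = c) :
    (PySem.List.pyRange a b 1).map f = List.replicate (b - a).toNat c := by
  rw [List.eq_replicate_iff]
  refine ⟨by rw [List.length_map, PySem.List.length_pyRange_one], ?_⟩
  intro x hx
  simp only [List.mem_map] at hx
  obtain ⟨i, hi, hfx⟩ := hx
  rw [PySem.List.mem_pyRange_one] at hi
  rw [← hfx]
  exact h i hi.1 hi.2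

-- closed form of B's greedy loop: with k = n+1 cores and remaining = k*q + r (0 ≤ r < k,
-- 0 ≤ q), the loop appends r copies of 2^(q+1) then k - r copies of 2^q to the accumulator
theorem pv_alt_closed (n : Nat) : ∀ (q r : Int) (acc : List Int), 0 ≤ q → 0 ≤ r → r < (n:Int) + 1 →
    distribute_bits_py_altGo (((n:Int) + 1) * q + r) ((n:Int) + 1) acc
      = acc ++ List.replicate r.toNat ((2:Int) ^ (q+1).toNat)
        ++ List.replicate (((n:Int) + 1 - r)).toNat ((2:Int) ^ q.toNat) := by
  induction n with
  | zero =>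
    intro q r acc hq hr0 hr1
    have hr : r = 0 := by omega
    subst hr
    simp only [Nat.cast_zero, zero_add, one_mul, add_zero]
    rw [distribute_bits_py_altGo, if_pos (by omega : (0:Int) < 1)]
    have hshare : -(PySem.Int.floordiv (-q) 1) = q := by
      rw [PySem.Int.neg_floordiv_neg_eq_iff_of_pos (by omega)]
      constructor <;> nlinarith
    simp only [hshare]
    rw [distribute_bits_py_altGo]
    norm_num
  | succ m ih =>
    intro q r acc hq hr0 hr1
    push_cast at hr1 ⊢
    set k : Int := (m:Int) + 2 with hk
    have hk1 : (m:Int) + 1 + 1 = k := by rw [hk]; ring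
    have hkpos : (0:Int) < k := by omega
    rw [hk1, distribute_bits_py_altGo, if_pos hkpos]
    by_cases hr : r = 0
    · subst hr
      have hshare : -(PySem.Int.floordiv (-(k * q + 0)) k) = q := by
        rw [PySem.Int.neg_floordiv_neg_eq_iff_of_pos hkpos]
        constructor <;> nlinarith
      simp only [hshare]
      have harg : k * q + 0 - q = ((m:Int) + 1) * q + 0 := by ring
      have := ih q 0 (acc ++ [(2:Int) ^ q.toNat]) hq le_rfl (by omega)
      rw [harg, show k - 1 = (m:Int) + 1 by omega, this]
      have h1 : (k - (0:Int)).toNat = ((m:Int) + 1 - 0).toNat + 1 := by omega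
      rw [h1, List.replicate_succ]
      simp
    · have hrpos : 0 < r := by omega
      have hshare : -(PySem.Int.floordiv (-(k * q + r)) k) = q + 1 := by
        rw [PySem.Int.neg_floordiv_neg_eq_iff_of_pos hkpos]
        constructor <;> nlinarith
      simp only [hshare]
      have harg : k * q + r - (q + 1) = ((m:Int) + 1) * q + (r - 1) := by ring
      have := ih q (r - 1) (acc ++ [(2:Int) ^ (q+1).toNat]) hq (by omega) (by omega)
      rw [harg, show k - 1 = (m:Int) + 1 by omega, this]
      have h1 : r.toNat = (r - 1).toNat + 1 := by omega
      have h2 : (k - r).toNat = ((m:Int) + 1 - (r - 1)).toNat := by omega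
      rw [h1, h2, List.replicate_succ]
      simp

theorem distribute_bits_py_spec : Claim_equal_distribute_bits_py := by
  unfold Claim_equal_distribute_bits_py
  intro total_bits n_cores _ hpre
  unfold Spec_distribute_bits_py distribute_bits_py
  obtain ⟨hne, hnn⟩ := hpre
  rw [PySem.List.foldl_append_singleton_eq_map]
  rcases lt_or_gt_of_ne hne with hneg | hpos
  · -- n_cores < 0 : range is empty, B's base case gives []
    rw [PySem.List.pyRange_one_eq_nil (by omega)]
    unfold distribute_bits_py_alt
    rw [distribute_bits_py_altGo, if_neg (by omega : ¬ (0:Int) < n_cores)]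
    simp
  · -- n_cores > 0 : both sides equal the two-block replicate form
    have ht : 0 ≤ total_bits := hnn hpos
    set q := PySem.Int.floordiv total_bits n_cores with hqdef
    set r := PySem.Int.mod total_bits n_cores with hrdef
    have hqe : q = total_bits / n_cores := by
      rw [hqdef, PySem.Int.floordiv_eq_ediv_of_pos hpos]
    have hre : r = total_bits % n_cores := by
      rw [hrdef, PySem.Int.mod_eq_emod_of_pos hpos]
    have hr0 : 0 ≤ r := by rw [hre]; exact Int.emod_nonneg _ (by omega)
    have hr1 : r < n_cores := by rw [hre]; exact Int.emod_lt_of_pos _ hpos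
    have hq0 : 0 ≤ q := by rw [hqe]; exact Int.ediv_nonneg ht (le_of_lt hpos)
    have hsum : n_cores * q + r = total_bits := by
      rw [hqe, hre]; exact Int.mul_ediv_add_emod total_bits n_cores
    -- A's side: split the range at r, each half maps to a constant block
    have hhigh := pv_map_const_replicate
      (fun i => (2:Int) ^ (q + if i < r then 1 else 0).toNat) 0 r ((2:Int) ^ (q + 1).toNat)
      (fun i _ hib => by simp [if_pos hib])
    have hlow := pv_map_const_replicate
      (fun i => (2:Int) ^ (q + if i < r then 1 else 0).toNat) r n_cores ((2:Int) ^ q.toNat)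
      (fun i hia _ => by simp [if_neg (not_lt.mpr hia)])
    rw [PySem.List.pyRange_one_append 0 r n_cores hr0 (le_of_lt hr1), List.map_append,
        hhigh, hlow]
    -- B's side: the closed form of the greedy recursion
    have hm : ((n_cores - 1).toNat : Int) + 1 = n_cores := by omega
    have hB := pv_alt_closed (n_cores - 1).toNat q r [] hq0 hr0 (by omega)
    rw [hm, hsum] at hB
    unfold distribute_bits_py_alt
    rw [hB]
    norm_num
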